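-- pv_equiv track=rewrite | github.com/tacitvenom/genomics_algo | genomics_algo/helper.py | get_freq_for_qualities
-- ===== SOURCE A (Python) =====
-- from collections import Counter
-- from typing import Dict, List, Tuple
--
-- def map_phred33_ascii_to_qualityscore(phred33_char: str) -> float:
--     """Maps a ASCII phred33 quality character to a quality score
--     >>> map_phred33_ascii_to_qualityscore("#")
--     2
--     >>> map_phred33_ascii_to_qualityscore("J")
--     41
--     """
--     return ord(phred33_char) - 33
--
-- def get_freq_for_qualities(qualities: List[str]) -> Tuple[List[str], List[int]]:
--     """Generates a frequency distribution from a list of quality strings"""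
--     concatenated_qualities = "".join(qualities)
--     quality_scores = [
--         map_phred33_ascii_to_qualityscore(char) for char in concatenated_qualities
--     ]
--     freq = Counter(quality_scores)
--     sorted_freq = sorted(dict(freq).items())
--     values = [pair[0] for pair in sorted_freq]
--     frequencies = [pair[1] for pair in sorted_freq]
--     return values, frequencies
-- ===== SOURCE B (Python) =====
-- def get_freq_for_qualities(qualities):
--     """Frequency distribution of phred33 scores: sort the scores, then
--     run-length scan the sorted list (sort-then-group instead of count-then-sort)."""
--     scores = sorted(ord(c) - 33 for q in qualities for c in q)
--     values = []
--     frequencies = []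
--     i = 0
--     n = len(scores)
--     while i < n:
--         j = i + 1
--         while j < n and scores[j] == scores[i]:
--             j += 1
--         values.append(scores[i])
--         frequencies.append(j - i)
--         i = j
--     return values, frequencies
-- ===== Notes on version B (the rewrite author's own statement) =====
-- stated objective: alternative
-- what changed: B sorts the score list itself and run-length scans the sorted run structure, instead of building a Counter and sorting its items; the output order arises from the data sort, not from sorting distinct keys.
import Mathlib
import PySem

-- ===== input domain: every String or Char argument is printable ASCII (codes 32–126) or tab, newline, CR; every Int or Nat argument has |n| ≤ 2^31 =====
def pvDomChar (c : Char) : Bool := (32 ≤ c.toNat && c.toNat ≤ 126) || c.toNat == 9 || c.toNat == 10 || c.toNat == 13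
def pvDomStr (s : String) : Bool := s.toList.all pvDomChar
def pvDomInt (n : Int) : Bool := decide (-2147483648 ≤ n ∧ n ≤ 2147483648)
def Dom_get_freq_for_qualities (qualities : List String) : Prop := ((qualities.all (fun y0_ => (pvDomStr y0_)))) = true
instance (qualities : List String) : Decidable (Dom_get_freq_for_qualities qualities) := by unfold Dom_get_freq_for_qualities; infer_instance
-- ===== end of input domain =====

-- B re-implements the frequency distribution by sorting the scores and run-length scanning
-- the sorted list, instead of A's Counter-then-sorted-items; return values proved equal.

-- ===== PORT A =====
def map_phred33_ascii_to_qualityscore (phred33_char : Char) : Int :=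
  (phred33_char.toNat : Int) - 33

def get_freq_for_qualities (qualities : List String) : List Int × List Int :=
  let concatenated_qualities := PySem.Str.join "" qualities
  let quality_scores := concatenated_qualities.toList.map map_phred33_ascii_to_qualityscore
  let freq := PySem.Dict.counter quality_scores
  let sorted_freq := PySem.List.sorted2 freq.items (fun p => p.1) (fun p => p.2) false
  (sorted_freq.map (fun p => p.1), sorted_freq.map (fun p => p.2))

-- ===== PORT B =====
-- inner while loop of Source B: count the run of elements equal to v at the head, return (count, rest)
def runLoop (v : Int) : List Int → Nat × List Int
  | [] => (0, [])
  | y :: ys =>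
    if y == v then
      let r := runLoop v ys
      (r.1 + 1, r.2)
    else (0, y :: ys)

theorem runLoop_snd_le (v : Int) (l : List Int) : (runLoop v l).2.length ≤ l.length := by
  induction l with
  | nil => simp [runLoop]
  | cons y ys ih =>
    simp only [runLoop]
    split
    · exact le_trans ih (Nat.le_succ _)
    · exact le_refl _

-- outer while loop of Source B over the sorted scores
def rleGo : List Int → List Int → List Int → List Int × List Int
  | [], vs, fs => (vs, fs)
  | x :: xs, vs, fs =>
    let r := runLoop x xs
    rleGo r.2 (vs ++ [x]) (fs ++ [1 + (r.1 : Int)])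
termination_by l _ _ => l.length
decreasing_by exact Nat.lt_succ_of_le (runLoop_snd_le x xs)

def get_freq_for_qualities_alt (qualities : List String) : List Int × List Int :=
  let scores := PySem.List.sorted
    ((qualities.flatMap (fun q => q.toList)).map (fun c => ((c.toNat : Int) - 33))) (fun x => x) false
  rleGo scores [] []

-- ===== PRECONDITION & SPEC =====
def Spec_get_freq_for_qualities (qualities : List String) (out : List Int × List Int) : Prop := out = get_freq_for_qualities_alt qualities
instance (qualities : List String) (out : List Int × List Int) : Decidable (Spec_get_freq_for_qualities qualities out) := by unfold Spec_get_freq_for_qualities; infer_instance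

-- ===== CLAIM (what is proved, stated in full; the proofs are below) =====
def Claim_equal_get_freq_for_qualities : Prop := ∀ (qualities : List String), Dom_get_freq_for_qualities qualities → Spec_get_freq_for_qualities qualities (get_freq_for_qualities qualities)

-- ===== LEMMAS AND PROOFS =====

-- canonical frequency table: distinct scores in increasing order, paired with their counts
def freqPairs (l : List Int) : List (Int × Int) :=
  (PySem.List.sorted (PySem.Set.ofList l) (fun x => x) false).map (fun k => (k, (l.count k : Int)))

theorem insertBy_congr {α : Type} (p q : α → α → Bool) (x : α) (ys : List α)
    (h : ∀ b ∈ ys, p x b = q x b) :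
    PySem.List.insertBy p x ys = PySem.List.insertBy q x ys := by
  induction ys with
  | nil => rfl
  | cons y ys ih =>
    simp only [PySem.List.insertBy]
    rw [h y (by simp)]
    split
    · rfl
    · rw [ih (fun b hb => h b (by simp [hb]))]

theorem foldl_insertBy_congr {α : Type} (p q : α → α → Bool) :
    ∀ (xs acc : List α), (∀ a ∈ xs, ∀ b ∈ acc, p a b = q a b) →
    (∀ a ∈ xs, ∀ b ∈ xs, p a b = q a b) →
    xs.foldl (fun acc x => PySem.List.insertBy p x acc) acc
      = xs.foldl (fun acc x => PySem.List.insertBy q x acc) acc := by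
  intro xs
  induction xs with
  | nil => intro acc _ _; rfl
  | cons z zs ih =>
    intro acc hacc hxs
    simp only [List.foldl_cons]
    rw [insertBy_congr p q z acc (fun b hb => hacc z (by simp) b hb)]
    apply ih
    · intro a ha b hb
      rcases (PySem.List.mem_insertBy q z b acc).1 hb with hb | hb
      · exact hxs a (by simp [ha]) b (by simp [hb])
      · exact hacc a (by simp [ha]) b hb
    · intro a ha b hb
      exact hxs a (by simp [ha]) b (by simp [hb])

theorem sortedItems_eq_freqPairs (l : List Int) :
    PySem.List.sorted2 (PySem.Dict.counter l).items (fun p => p.1) (fun p => p.2) false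
      = freqPairs l := by
  have hitems := PySem.Dict.items_counter l
  -- every element of the items list is determined by its key
  have hdet : ∀ a ∈ (PySem.Dict.counter l).items, ∀ b ∈ (PySem.Dict.counter l).items,
      a.1 = b.1 → a = b := by
    intro a ha b hb hab
    rw [hitems] at ha hb
    rcases List.mem_map.1 ha with ⟨ka, _, rfl⟩
    rcases List.mem_map.1 hb with ⟨kb, _, rfl⟩
    simp only at hab
    subst hab
    rfl
  -- the lexicographic tuple comparison agrees with the key comparison on the items
  have hcongr : PySem.List.sorted2 (PySem.Dict.counter l).items (fun p => p.1) (fun p => p.2) false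
      = PySem.List.sorted (PySem.Dict.counter l).items (fun p => p.1) false := by
    show List.foldl (fun acc x => PySem.List.insertBy _ x acc) [] _
        = List.foldl (fun acc x => PySem.List.insertBy _ x acc) [] _
    apply foldl_insertBy_congr
    · intro a _ b hb
      exact absurd hb (List.not_mem_nil)
    · intro a ha b hb
      by_cases h1 : a.1 = b.1
      · have := hdet a ha b hb h1
        subst this
        simp
      · rcases lt_or_gt_of_ne h1 with h | h
        · simp [h]
        · simp [not_lt_of_gt h, h]
  rw [hcongr]
  apply PySem.List.sorted_eq_of_perm_of_pairwise_lt
  · rw [hitems]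
    exact (PySem.List.sorted_perm (PySem.Set.ofList l) (fun x => x) false).map _
  · unfold freqPairs
    rw [List.pairwise_map]
    exact (PySem.List.sorted_ofList_pairwise_lt l).imp (fun h => h)

theorem runLoop_eq (v : Int) (l : List Int) :
    runLoop v l = ((l.takeWhile (fun y => y == v)).length, l.dropWhile (fun y => y == v)) := by
  induction l with
  | nil => rfl
  | cons y ys ih =>
    simp only [runLoop, List.takeWhile, List.dropWhile]
    by_cases h : (y == v) = true
    · simp [h, ih]
    · simp [h]

theorem freqPairs_nil : freqPairs [] = [] := rfl

theorem freqPairs_cons_run (x : Int) (xs : List Int)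
    (hlt : ∀ y ∈ xs.dropWhile (fun y => y == x), x < y) :
    freqPairs (x :: xs) = (x, 1 + ((xs.takeWhile (fun y => y == x)).length : Int))
      :: freqPairs (xs.dropWhile (fun y => y == x)) := by
  set r := xs.takeWhile (fun y => y == x) with hr_def
  set rest := xs.dropWhile (fun y => y == x) with hrest_def
  have hr : ∀ y ∈ r, y = x := by
    intro y hy
    rw [hr_def] at hy
    exact eq_of_beq (List.mem_takeWhile_imp (p := fun y => y == x) hy)
  have hxnotin : x ∉ rest := fun h => lt_irrefl x (hlt x h)
  have hxs : r ++ rest = xs := List.takeWhile_append_dropWhile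
  have hmemxs : ∀ a, (a = x ∨ a ∈ xs) ↔ (a = x ∨ a ∈ rest) := by
    intro a
    constructor
    · rintro (rfl | h)
      · exact Or.inl rfl
      · rw [← hxs, List.mem_append] at h
        rcases h with h | h
        · exact Or.inl (hr a h)
        · exact Or.inr h
    · rintro (rfl | h)
      · exact Or.inl rfl
      · right
        rw [← hxs, List.mem_append]
        exact Or.inr h
  have hsorted_eq : PySem.List.sorted (PySem.Set.ofList (x :: xs)) (fun k => k) false
      = x :: PySem.List.sorted (PySem.Set.ofList rest) (fun k => k) false := by
    apply PySem.List.sorted_eq_of_perm_of_pairwise_lt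
    · rw [List.perm_ext_iff_of_nodup _ (PySem.Set.nodup_ofList _)]
      · intro a
        rw [List.mem_cons, PySem.List.mem_sorted, PySem.Set.mem_ofList,
          PySem.Set.mem_ofList, List.mem_cons]
        exact (hmemxs a).symm
      · refine List.nodup_cons.2 ⟨?_, ?_⟩
        · intro h
          rw [PySem.List.mem_sorted, PySem.Set.mem_ofList] at h
          exact hxnotin h
        · exact ((PySem.List.sorted_perm _ _ _).nodup_iff).2 (PySem.Set.nodup_ofList _)
    · refine List.pairwise_cons.2 ⟨?_, PySem.List.sorted_ofList_pairwise_lt rest⟩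
      intro y hy
      rw [PySem.List.mem_sorted, PySem.Set.mem_ofList] at hy
      exact hlt y hy
  have hcount_r : r.count x = r.length := List.count_eq_length.2 (fun b hb => (hr b hb).symm)
  have hcount_x : (x :: xs).count x = r.length + 1 := by
    rw [List.count_cons, ← hxs, List.count_append, hcount_r, List.count_eq_zero.2 hxnotin]
    simp
  have hcount_k : ∀ k ∈ rest, (x :: xs).count k = rest.count k := by
    intro k hk
    have hkx : x ≠ k := ne_of_lt (hlt k hk)
    have hknr : k ∉ r := fun h => absurd (hr k h) (fun e => hkx e.symm)
    rw [List.count_cons, ← hxs, List.count_append, List.count_eq_zero.2 hknr]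
    simp [hkx]
  unfold freqPairs
  rw [hsorted_eq, List.map_cons, hcount_x]
  congr 1
  · congr 1
    push_cast
    ring
  · apply List.map_congr_left
    intro k hk
    rw [PySem.List.mem_sorted, PySem.Set.mem_ofList] at hk
    rw [hcount_k k hk]

theorem rleGo_eq : ∀ (n : Nat) (s : List Int), s.length ≤ n → s.Pairwise (· ≤ ·) →
    ∀ (vs fs : List Int),
    rleGo s vs fs = (vs ++ (freqPairs s).map (fun p => p.1), fs ++ (freqPairs s).map (fun p => p.2)) := by
  intro n
  induction n with
  | zero =>
    intro s hlen _ vs fs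
    rw [List.length_eq_zero_iff.1 (Nat.le_zero.1 hlen)]
    simp [rleGo, freqPairs_nil]
  | succ n ih =>
    intro s hlen hs vs fs
    match s with
    | [] => simp [rleGo, freqPairs_nil]
    | x :: xs =>
      rcases List.pairwise_cons.1 hs with ⟨hx, hxs'⟩
      have hrest_sorted : (xs.dropWhile (fun y => y == x)).Pairwise (· ≤ ·) :=
        List.Pairwise.sublist (List.dropWhile_sublist _) hxs'
      have hlt : ∀ y ∈ xs.dropWhile (fun y => y == x), x < y := by
        intro y hy
        match hrc : xs.dropWhile (fun y => y == x) with
        | [] => rw [hrc] at hy; exact absurd hy (List.not_mem_nil)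
        | h :: t =>
          have hhne : (h == x) = false := by
            have := List.head?_dropWhile_not (fun y => y == x) xs
            rw [hrc] at this
            simpa using this
          have hhxs : h ∈ xs := (List.dropWhile_sublist _).mem (hrc ▸ List.mem_cons_self)
          have hxh : x < h := lt_of_le_of_ne (hx h hhxs) (fun e => by simp [← e] at hhne)
          rw [hrc] at hy
          rcases List.mem_cons.1 hy with rfl | hy
          · exact hxh
          · have : h ≤ y := (List.pairwise_cons.1 (hrc ▸ hrest_sorted)).1 y hy
            exact lt_of_lt_of_le hxh this
      have hlen' : (xs.dropWhile (fun y => y == x)).length ≤ n :=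
        le_trans (List.length_dropWhile_le _ _) (Nat.le_of_succ_le_succ hlen)
      rw [rleGo, runLoop_eq, ih _ hlen' hrest_sorted, freqPairs_cons_run x xs hlt]
      simp

theorem freqPairs_sorted (l : List Int) :
    freqPairs (PySem.List.sorted l (fun x => x) false) = freqPairs l := by
  unfold freqPairs
  have hperm : (PySem.Set.ofList (PySem.List.sorted l (fun x => x) false)).Perm
      (PySem.Set.ofList l) := by
    rw [List.perm_ext_iff_of_nodup (PySem.Set.nodup_ofList _) (PySem.Set.nodup_ofList _)]
    intro a
    rw [PySem.Set.mem_ofList, PySem.Set.mem_ofList, PySem.List.mem_sorted]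
  rw [PySem.List.sorted_eq_sorted_of_perm _ _ _ (fun _ _ h => h) hperm]
  apply List.map_congr_left
  intro k _
  rw [(PySem.List.sorted_perm l (fun x => x) false).count_eq]

theorem chars_join_nil_sep : ∀ (css : List (List Char)), PySem.Chars.join [] css = css.flatten
  | [] => by rw [PySem.Chars.join_nil]; rfl
  | [a] => by rw [PySem.Chars.join_singleton]; simp
  | a :: b :: r => by
      rw [PySem.Chars.join_cons_cons, chars_join_nil_sep (b :: r)]
      simp

theorem join_toList (qs : List String) :
    (PySem.Str.join "" qs).toList = qs.flatMap String.toList := by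
  rw [PySem.Str.toList_join]
  have h : ("" : String).toList = [] := rfl
  rw [h, chars_join_nil_sep, List.flatMap_def]


-- ===== VERDICT (by name: the statement is the Claim_ definition above) =====
theorem get_freq_for_qualities_spec : Claim_equal_get_freq_for_qualities := by
  intro qualities _
  unfold Spec_get_freq_for_qualities
  show get_freq_for_qualities qualities = get_freq_for_qualities_alt qualities
  simp only [get_freq_for_qualities, get_freq_for_qualities_alt, join_toList]
  rw [sortedItems_eq_freqPairs]
  have hpw : (PySem.List.sorted ((qualities.flatMap (fun q => q.toList)).map
      (fun c => ((c.toNat : Int) - 33))) (fun x => x) false).Pairwise (· ≤ ·) := by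
    have := PySem.List.sorted_pairwise ((qualities.flatMap (fun q => q.toList)).map
      (fun c => ((c.toNat : Int) - 33))) (fun x => x)
    simpa using this
  rw [rleGo_eq _ _ (le_refl _) hpw]
  rw [freqPairs_sorted]
  simp only [List.nil_append, Prod.mk.injEq]
  exact ⟨rfl, rfl⟩
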